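-- pv_equiv track=rewrite | github.com/autowww/forge-fleet | scripts/check-docs-public-copy.py | _strip_fenced_and_html_comments
-- ===== SOURCE A (Python) =====
-- def _strip_fenced_and_html_comments(text: str) -> str:
--     out: list[str] = []
--     fence = False
--     for line in text.splitlines():
--         t = line.strip()
--         if t.startswith("```"):
--             fence = not fence
--             continue
--         if fence:
--             continue
--         if t.startswith("<!--") and t.endswith("-->"):
--             continue
--         out.append(line)
--     return "\n".join(out)
-- ===== SOURCE B (Python) =====
-- def _strip_fenced_and_html_comments(text: str) -> str:
--     # Split the lines into segments delimited by fence-marker lines (markers discarded);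
--     # even-indexed segments are outside fences. Keep their non-HTML-comment lines.
--     segments: list[list[str]] = []
--     cur: list[str] = []
--     for line in text.splitlines():
--         if line.strip().startswith("```"):
--             segments.append(cur)
--             cur = []
--         else:
--             cur.append(line)
--     segments.append(cur)
--     kept = [line
--             for i, seg in enumerate(segments) if i % 2 == 0
--             for line in seg
--             if not (line.strip().startswith("<!--") and line.strip().endswith("-->"))]
--     return "\n".join(kept)
-- ===== Notes on version B (the rewrite author's own statement) =====
-- stated objective: alternative
-- what changed: Replaces the single-pass boolean fence toggle with a split-into-segments decomposition: lines are partitioned at fence-marker lines, even-indexed segments (outside fences) are kept, and HTML-comment lines are filtered from them.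
import Mathlib
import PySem

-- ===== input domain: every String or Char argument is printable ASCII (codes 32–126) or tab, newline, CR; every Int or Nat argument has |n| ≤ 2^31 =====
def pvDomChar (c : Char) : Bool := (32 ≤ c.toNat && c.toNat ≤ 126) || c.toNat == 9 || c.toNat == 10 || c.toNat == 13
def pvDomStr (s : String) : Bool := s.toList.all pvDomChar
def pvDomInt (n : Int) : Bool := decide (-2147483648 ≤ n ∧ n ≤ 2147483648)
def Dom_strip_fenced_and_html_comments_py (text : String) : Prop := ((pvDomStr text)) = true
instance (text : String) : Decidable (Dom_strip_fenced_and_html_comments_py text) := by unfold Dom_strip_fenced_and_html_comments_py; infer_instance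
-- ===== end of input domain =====

-- B replaces A's single-pass boolean fence toggle by a split-into-segments decomposition
-- (partition at fence lines, keep even-indexed segments, filter HTML-comment lines); alternative, same cost.

-- shared character-level predicates (each Python writes the same strip/startswith tests)
def pvFence (line : String) : Bool := PySem.Str.startswith (PySem.Str.strip line) "```"
def pvComment (line : String) : Bool :=
  PySem.Str.startswith (PySem.Str.strip line) "<!--" && PySem.Str.endswith (PySem.Str.strip line) "-->"

-- ===== PORT A =====
def strip_fenced_and_html_comments_py (text : String) : String :=
  let r := (PySem.Str.splitlines text).foldl
    (fun (st : List String × Bool) line =>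
      if pvFence line then (st.1, !st.2)
      else if st.2 then (st.1, st.2)
      else if pvComment line then (st.1, st.2)
      else (st.1 ++ [line], st.2))
    ([], false)
  PySem.Str.join "\n" r.1

-- ===== PORT B =====
def strip_fenced_and_html_comments_py_alt (text : String) : String :=
  let st := (PySem.Str.splitlines text).foldl
    (fun (st : List (List String) × List String) line =>
      if pvFence line then (st.1 ++ [st.2], ([] : List String))
      else (st.1, st.2 ++ [line]))
    ([], [])
  let segments := st.1 ++ [st.2]
  let kept := (PySem.List.enumerate segments).flatMap
    (fun p => if p.1 % 2 == 0 then p.2.filter (fun line => !pvComment line) else [])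
  PySem.Str.join "\n" kept

-- ===== PRECONDITION & SPEC =====
def Spec_strip_fenced_and_html_comments_py (text : String) (out : String) : Prop := out = strip_fenced_and_html_comments_py_alt text
instance (text : String) (out : String) : Decidable (Spec_strip_fenced_and_html_comments_py text out) := by unfold Spec_strip_fenced_and_html_comments_py; infer_instance

-- ===== CLAIM (what is proved, stated in full; the proofs are below) =====
def Claim_equal_strip_fenced_and_html_comments_py : Prop := ∀ (text : String), Dom_strip_fenced_and_html_comments_py text → Spec_strip_fenced_and_html_comments_py text (strip_fenced_and_html_comments_py text)

-- ===== LEMMAS AND PROOFS =====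

-- reference value of A's loop, structurally
def pvRef : List String → Bool → List String
  | [], _ => []
  | l :: rest, fence =>
    if pvFence l then pvRef rest (!fence)
    else if fence then pvRef rest fence
    else if pvComment l then pvRef rest fence
    else l :: pvRef rest fence

-- reference segment split, structurally
def pvSplit : List String → List (List String)
  | [] => [[]]
  | l :: rest =>
    if pvFence l then [] :: pvSplit rest
    else match pvSplit rest with
      | [] => [[l]]
      | s :: ss => (l :: s) :: ss

def pvConsHead (c : List String) : List (List String) → List (List String)
  | [] => [c]
  | s :: ss => (c ++ s) :: ss

-- alternating keep: concatenation of segments at even (b = true) positions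
def pvKeep : Bool → List (List String) → List String
  | _, [] => []
  | b, s :: ss => (if b then s else []) ++ pvKeep (!b) ss

theorem pvSplit_ne_nil (lines : List String) : pvSplit lines ≠ [] := by
  cases lines with
  | nil => simp [pvSplit]
  | cons l rest =>
    simp only [pvSplit]
    split
    · simp
    · split <;> simp

theorem pvA_loop (lines : List String) :
    ∀ (out : List String) (fence : Bool),
    (lines.foldl
      (fun (st : List String × Bool) line =>
        if pvFence line then (st.1, !st.2)
        else if st.2 then (st.1, st.2)
        else if pvComment line then (st.1, st.2)
        else (st.1 ++ [line], st.2))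
      (out, fence)).1 = out ++ pvRef lines fence := by
  induction lines with
  | nil => intro out fence; simp [pvRef]
  | cons l rest ih =>
    intro out fence
    simp only [List.foldl_cons, pvRef]
    by_cases hf : pvFence l
    · simp [hf, ih]
    · by_cases hc : pvComment l
      · cases fence <;> simp [hf, hc, ih]
      · cases fence <;> simp [hf, hc, ih]

theorem pvB_loop (lines : List String) :
    ∀ (segs : List (List String)) (cur : List String),
    (let r := lines.foldl
      (fun (st : List (List String) × List String) line =>
        if pvFence line then (st.1 ++ [st.2], ([] : List String))
        else (st.1, st.2 ++ [line]))
      (segs, cur)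
    r.1 ++ [r.2]) = segs ++ pvConsHead cur (pvSplit lines) := by
  induction lines with
  | nil => intro segs cur; simp [pvSplit, pvConsHead]
  | cons l rest ih =>
    intro segs cur
    simp only [List.foldl_cons, pvSplit]
    by_cases hf : pvFence l
    · simp only [hf, if_pos]
      rw [ih]
      rcases h : pvSplit rest with _ | ⟨s, ss⟩
      · exact absurd h (pvSplit_ne_nil rest)
      · simp [pvConsHead]
    · simp only [hf, Bool.false_eq_true, if_false]
      rw [ih]
      rcases h : pvSplit rest with _ | ⟨s, ss⟩
      · exact absurd h (pvSplit_ne_nil rest)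
      · simp [pvConsHead]

theorem pvKeep_ref (lines : List String) :
    ∀ (fence : Bool),
    (pvKeep (!fence) (pvSplit lines)).filter (fun line => !pvComment line) = pvRef lines fence := by
  induction lines with
  | nil => intro fence; simp [pvSplit, pvKeep, pvRef]
  | cons l rest ih =>
    intro fence
    simp only [pvSplit, pvRef]
    by_cases hf : pvFence l
    · simp only [hf, if_true]
      rw [show (pvKeep (!fence) ([] :: pvSplit rest)) = pvKeep (!(!fence)) (pvSplit rest) by
        simp [pvKeep]]
      simp only [Bool.not_not]
      have := ih (!fence)
      simpa using this
    · simp only [hf, Bool.false_eq_true, if_false]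
      rcases h : pvSplit rest with _ | ⟨s, ss⟩
      · exact absurd h (pvSplit_ne_nil rest)
      · cases fence with
        | false =>
          have hih := ih false
          rw [h] at hih
          simp only [Bool.not_false, pvKeep, if_true] at hih ⊢
          by_cases hc : pvComment l <;>
            simp [hc, List.filter_append, ← hih]
        | true =>
          have hih := ih true
          rw [h] at hih
          simp only [Bool.not_true, pvKeep, Bool.false_eq_true, if_false, Bool.not_false] at hih ⊢
          by_cases hc : pvComment l <;> simpa [hc] using hih

theorem pvEnum_keep (ss : List (List String)) :
    ∀ (n : Int), 0 ≤ n →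
    (PySem.List.enumerate ss n).flatMap
      (fun p => if p.1 % 2 == 0 then p.2.filter (fun line => !pvComment line) else []) =
    (pvKeep (n % 2 == 0) ss).filter (fun line => !pvComment line) := by
  induction ss with
  | nil => intro n _; simp [PySem.List.enumerate_nil, pvKeep]
  | cons s ss ih =>
    intro n hn
    rw [PySem.List.enumerate_cons]
    simp only [List.flatMap_cons]
    rw [ih (n + 1) (by omega)]
    have hpar : ((n + 1) % 2 == 0) = !(n % 2 == 0) := by
      rcases Int.emod_two_eq_zero_or_one n with h | h <;>
        simp [h] <;> omega
    rw [hpar]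
    by_cases he : (n % 2 == 0) = true <;>
      simp [he, pvKeep, List.filter_append]

-- ===== VERDICT (by name: the statement is the Claim_ definition above) =====
theorem strip_fenced_and_html_comments_py_spec : Claim_equal_strip_fenced_and_html_comments_py := by
  intro text _
  unfold Spec_strip_fenced_and_html_comments_py
  unfold strip_fenced_and_html_comments_py strip_fenced_and_html_comments_py_alt
  simp only []
  set lines := PySem.Str.splitlines text with hl
  congr 1
  rw [pvA_loop lines [] false]
  have hseg := pvB_loop lines [] []
  simp only [List.nil_append] at hseg ⊢
  have hch : pvConsHead [] (pvSplit lines) = pvSplit lines := by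
    rcases h : pvSplit lines with _ | ⟨s, ss⟩
    · exact absurd h (pvSplit_ne_nil lines)
    · simp [pvConsHead]
  rw [hch] at hseg
  rw [hseg]
  rw [pvEnum_keep (pvSplit lines) 0 le_rfl]
  have := pvKeep_ref lines false
  simpa using this.symm
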